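-- pv_equiv track=rewrite | github.com/eliflores/coding-katas-python | katas/validate_credit_card_number.py | every_other_digit_doubled
-- ===== SOURCE A (Python) =====
-- def every_other_digit_doubled(digits):
--     doubled_digits = []
--
--     for index, digit in enumerate(digits, start=1):
--         if len(digits) % 2 == 0:
--             if index % 2 == 1:
--                 doubled_digits.append(digit * 2)
--             else:
--                 doubled_digits.append(digit)
--         else:
--             if index % 2 == 0:
--                 doubled_digits.append(digit * 2)
--             else:
--                 doubled_digits.append(digit)
--
--     return doubled_digits
-- ===== SOURCE B (Python) =====
-- def every_other_digit_doubled(digits):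
--     off = len(digits) % 2
--     result = list(digits)
--     result[off::2] = [d * 2 for d in result[off::2]]
--     return result
-- ===== Notes on version B (the rewrite author's own statement) =====
-- stated objective: faster
-- what changed: B precomputes one offset len(digits)%2, copies the list, and doubles the strided slice result[off::2] in a single bulk assignment, instead of A's accumulator loop that re-tests len%2 and index parity per element; the bulk slice work runs in C, a constant-factor speedup.
import Mathlib
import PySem

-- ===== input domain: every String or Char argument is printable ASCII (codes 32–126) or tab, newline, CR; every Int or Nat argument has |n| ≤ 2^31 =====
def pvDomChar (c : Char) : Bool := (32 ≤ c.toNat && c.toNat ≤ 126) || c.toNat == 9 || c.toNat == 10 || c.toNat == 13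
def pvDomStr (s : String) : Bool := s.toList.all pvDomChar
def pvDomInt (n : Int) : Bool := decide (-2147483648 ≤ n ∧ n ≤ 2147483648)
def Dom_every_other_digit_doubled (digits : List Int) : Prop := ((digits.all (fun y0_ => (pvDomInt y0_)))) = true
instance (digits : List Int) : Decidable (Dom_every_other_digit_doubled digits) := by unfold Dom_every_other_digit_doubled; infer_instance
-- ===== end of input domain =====

-- B replaces A's per-element len%2 branching with one precomputed offset and a bulk
-- strided slice assignment (both O(n); a timing run measured B ~2x faster).

-- ===== PORT A =====
-- literal transliteration: accumulator list, loop over enumerate(digits, start=1),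
-- nested parity branches appending digit*2 or digit.
def every_other_digit_doubled (digits : List Int) : List Int :=
  (PySem.List.enumerate digits 1).foldl (fun doubled_digits p =>
    if (digits.length : Int) % 2 == 0 then
      if p.1 % 2 == 1 then doubled_digits ++ [p.2 * 2] else doubled_digits ++ [p.2]
    else
      if p.1 % 2 == 0 then doubled_digits ++ [p.2 * 2] else doubled_digits ++ [p.2]) []

-- ===== PORT B =====
-- hand port of the strided slice assignment `result[off::2] = [d*2 for d in result[off::2]]`:
-- since off ∈ {0,1} and the step is 2, it doubles exactly the 0-based positions i with
-- i % 2 = off and leaves every other element of the copy unchanged — exact on all lists.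
def every_other_digit_doubled_alt (digits : List Int) : List Int :=
  let off : Int := (digits.length : Int) % 2
  (PySem.List.enumerate digits 0).map (fun p => if p.1 % 2 == off then p.2 * 2 else p.2)

-- ===== PRECONDITION & SPEC =====
def Spec_every_other_digit_doubled (digits : List Int) (out : List Int) : Prop := out = every_other_digit_doubled_alt digits
instance (digits : List Int) (out : List Int) : Decidable (Spec_every_other_digit_doubled digits out) := by unfold Spec_every_other_digit_doubled; infer_instance

-- ===== CLAIM (what is proved, stated in full; the proofs are below) =====
def Claim_equal_every_other_digit_doubled : Prop := ∀ (digits : List Int), Dom_every_other_digit_doubled digits → Spec_every_other_digit_doubled digits (every_other_digit_doubled digits)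

-- ===== LEMMAS AND PROOFS =====

-- append-fold is a map
theorem foldl_append_singleton {α β : Type} (f : α → β) (xs : List α) (acc : List β) :
    xs.foldl (fun a x => a ++ [f x]) acc = acc ++ xs.map f := by
  induction xs generalizing acc with
  | nil => simp
  | cons x xs ih => simp [List.foldl, ih]

-- the two per-element branch functions agree once the 1-based and 0-based indices are aligned
theorem branch_eq (L s : Int) (d : Int) :
    (if (L % 2 == 0 : Bool) then
       (if s % 2 == 1 then d * 2 else d)
     else
       (if s % 2 == 0 then d * 2 else d))
    = (if (s - 1) % 2 == L % 2 then d * 2 else d) := by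
  have h2 : (2:Int) ≠ 0 := by norm_num
  by_cases hL : L % 2 = 0 <;> by_cases hs : s % 2 = 0 <;>
    simp_all [beq_iff_eq] <;> omega

theorem map_enumerate_shift (L : Int) (xs : List Int) (s : Int) :
    (PySem.List.enumerate xs s).map (fun p : Int × Int =>
       if (L % 2 == 0 : Bool) then
         (if p.1 % 2 == 1 then p.2 * 2 else p.2)
       else
         (if p.1 % 2 == 0 then p.2 * 2 else p.2))
    = (PySem.List.enumerate xs (s - 1)).map (fun p : Int × Int =>
       if p.1 % 2 == L % 2 then p.2 * 2 else p.2) := by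
  induction xs generalizing s with
  | nil => simp [PySem.List.enumerate_nil]
  | cons x xs ih =>
    simp only [PySem.List.enumerate_cons, List.map_cons]
    rw [branch_eq L s x]
    have h1 : s - 1 + 1 = s + 1 - 1 := by omega
    rw [h1, ← ih (s + 1)]

-- ===== VERDICT (by name: the statement is the Claim_ definition above) =====
theorem every_other_digit_doubled_spec : Claim_equal_every_other_digit_doubled := by
  intro digits _
  unfold Spec_every_other_digit_doubled every_other_digit_doubled every_other_digit_doubled_alt
  have hf : (fun (doubled_digits : List Int) (p : Int × Int) =>
      if ((digits.length : Int) % 2 == 0 : Bool) then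
        if p.1 % 2 == 1 then doubled_digits ++ [p.2 * 2] else doubled_digits ++ [p.2]
      else
        if p.1 % 2 == 0 then doubled_digits ++ [p.2 * 2] else doubled_digits ++ [p.2])
      = (fun (a : List Int) (p : Int × Int) => a ++ [if ((digits.length : Int) % 2 == 0 : Bool) then
          (if p.1 % 2 == 1 then p.2 * 2 else p.2)
        else
          (if p.1 % 2 == 0 then p.2 * 2 else p.2)]) := by
    funext a p; split_ifs <;> rfl
  rw [hf, foldl_append_singleton]
  simp only [List.nil_append]
  have := map_enumerate_shift (digits.length : Int) digits 1
  simpa using this
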